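-- pv_equiv track=rewrite | github.com/kajiwara727/MTWM | core/algorithm/dfmm.py | find_factors_for_sum
-- ===== SOURCE A (Python) =====
-- def find_factors_for_sum(ratio_sum, max_factor):
--     if ratio_sum <= 1: return []
--     n, factors = ratio_sum, []
--     while n > 1:
--         found_divisor = False
--         for d in range(max_factor, 1, -1):
--             if n % d == 0:
--                 factors.append(d)
--                 n //= d
--                 found_divisor = True
--                 break
--         if not found_divisor:
--             return None
--     return sorted(factors, reverse=True)
-- ===== SOURCE B (Python) =====
-- def _largest_divisor(n, max_factor):
--     """Largest divisor of n in [2, max_factor], or None, via sqrt trial division."""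
--     best = None
--     i = 1
--     while i * i <= n:
--         if n % i == 0:
--             for c in (i, n // i):
--                 if 2 <= c <= max_factor and (best is None or c > best):
--                     best = c
--         i += 1
--     return best
--
-- def find_factors_for_sum(ratio_sum, max_factor):
--     if ratio_sum <= 1:
--         return []
--     n, factors = ratio_sum, []
--     while n > 1:
--         d = _largest_divisor(n, max_factor)
--         if d is None:
--             return None
--         factors.append(d)
--         n //= d
--     return sorted(factors, reverse=True)
-- ===== Notes on version B (the rewrite author's own statement) =====
-- stated objective: faster
-- what changed: the inner downward scan over range(max_factor,1,-1) is replaced by a sqrt(n) trial-division that finds the largest divisor of n in [2,max_factor] by pairing each i with i*i<=n against its cofactor n//i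
import Mathlib
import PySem

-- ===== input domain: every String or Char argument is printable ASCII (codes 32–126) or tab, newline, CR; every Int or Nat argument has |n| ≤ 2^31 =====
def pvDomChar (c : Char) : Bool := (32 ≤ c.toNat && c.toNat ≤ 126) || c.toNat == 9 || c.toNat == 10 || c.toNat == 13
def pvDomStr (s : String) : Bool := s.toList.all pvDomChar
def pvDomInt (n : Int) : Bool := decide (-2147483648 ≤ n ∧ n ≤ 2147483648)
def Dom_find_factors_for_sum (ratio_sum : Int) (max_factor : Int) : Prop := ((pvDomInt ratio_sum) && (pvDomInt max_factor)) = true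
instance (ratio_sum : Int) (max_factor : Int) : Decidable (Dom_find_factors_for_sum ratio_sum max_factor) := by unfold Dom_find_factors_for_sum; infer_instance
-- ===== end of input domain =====

-- B replaces A's inner downward scan over range(max_factor,1,-1) by a √n trial division
-- that finds the largest divisor of n in [2, max_factor]; same outer greedy loop, same results.

lemma ffs_ediv_lt {n d : Int} (hn : 1 < n) (hd : 1 < d) : n / d < n := by
  rw [Int.ediv_lt_iff_lt_mul (by omega : (0:Int) < d)]; nlinarith

lemma ffs_loop_dec {n d : Int} (hn : 1 < n) (hd : 1 < d) :
    (PySem.Int.floordiv n d).toNat < n.toNat := by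
  rw [PySem.Int.floordiv_eq_ediv_of_pos (by omega)]
  have h1 : n / d < n := ffs_ediv_lt hn hd
  have h2 : 0 ≤ n / d := Int.ediv_nonneg (by omega) (by omega)
  omega

lemma ffs_scan_dec {n i : Int} (h : i * i ≤ n) :
    (n + 1 - (i + 1)).toNat < (n + 1 - i).toNat := by
  have : i ≤ n := by nlinarith [mul_self_nonneg (2 * i - 1)]
  omega

-- ===== PORT A =====
-- inner 'for d in range(max_factor, 1, -1): if n % d == 0: … break' = first match of the range
def ffsFindA (n mf : Int) : Option Int :=
  (PySem.List.pyRange mf 1 (-1)).find? (fun d => PySem.Int.mod n d == 0)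

lemma ffsFindA_pos {n mf d : Int} (h : ffsFindA n mf = some d) : 1 < d ∧ d ∣ n := by
  have hm := List.mem_of_find?_eq_some h
  have hp := List.find?_some h
  rw [PySem.List.mem_pyRange_neg_one] at hm
  simp only [beq_iff_eq] at hp
  exact ⟨hm.1, (PySem.Int.mod_eq_zero_iff_dvd n d).mp hp⟩

-- outer 'while n > 1' loop of A, carrying (n, factors)
def ffsLoopA (mf : Int) (n : Int) (factors : List Int) : Option (List Int) :=
  if hn : 1 < n then
    match h : ffsFindA n mf with
    | none => none
    | some d => ffsLoopA mf (PySem.Int.floordiv n d) (factors ++ [d])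
  else some (PySem.List.sorted factors (fun x => x) true)
termination_by n.toNat
decreasing_by exact ffs_loop_dec hn (ffsFindA_pos h).1

def find_factors_for_sum (ratio_sum : Int) (max_factor : Int) : Option (List Int) :=
  if ratio_sum ≤ 1 then some [] else ffsLoopA max_factor ratio_sum []

-- ===== PORT B =====
-- 'if 2 <= c <= max_factor and (best is None or c > best): best = c'
def ffsUpd (mf : Int) (best : Option Int) (c : Int) : Option Int :=
  if 2 ≤ c ∧ c ≤ mf then
    match best with
    | none => some c
    | some b => if b < c then some c else some b
  else best

-- 'while i * i <= n: if n % i == 0: try candidates i and n // i; i += 1'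
def ffsScanB (n mf : Int) (i : Int) (best : Option Int) : Option Int :=
  if hi : i * i ≤ n then
    ffsScanB n mf (i + 1)
      (if PySem.Int.mod n i = 0 then
        ffsUpd mf (ffsUpd mf best i) (PySem.Int.floordiv n i)
      else best)
  else best
termination_by (n + 1 - i).toNat
decreasing_by exact ffs_scan_dec hi

def ffsLargestB (n mf : Int) : Option Int := ffsScanB n mf 1 none

-- soundness of the scan (also cited by ffsLoopB's termination proof)
lemma ffsUpd_cases {mf c b : Int} {best : Option Int} (h : ffsUpd mf best c = some b) :
    (2 ≤ b ∧ b ≤ mf ∧ b = c) ∨ best = some b := by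
  unfold ffsUpd at h
  split_ifs at h with hg
  · cases best with
    | none =>
      simp only [Option.some.injEq] at h
      exact Or.inl ⟨by omega, by omega, h.symm⟩
    | some b0 =>
      simp only at h
      split_ifs at h with hlt <;> simp only [Option.some.injEq] at h
      · exact Or.inl ⟨by omega, by omega, h.symm⟩
      · exact Or.inr (by rw [h])
  · exact Or.inr h

lemma ffsScanB_sound (n mf : Int) :
    ∀ i best, 1 ≤ i → (∀ b, best = some b → 2 ≤ b ∧ b ≤ mf ∧ b ∣ n) →
      ∀ d, ffsScanB n mf i best = some d → 2 ≤ d ∧ d ≤ mf ∧ d ∣ n := by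
  intro i best
  fun_induction ffsScanB n mf i best with
  | case1 i best hle ih =>
    intro hi hinv d hd
    refine ih (by omega) ?_ d hd
    intro b hb
    split_ifs at hb with hmod
    · have hidvd : i ∣ n := (PySem.Int.mod_eq_zero_iff_dvd n i).mp hmod
      rcases ffsUpd_cases hb with ⟨h2, h3, rfl⟩ | hb1
      · refine ⟨h2, h3, ?_⟩
        rw [PySem.Int.floordiv_eq_ediv_of_pos (by omega)]
        obtain ⟨k, hk⟩ := hidvd
        refine ⟨i, ?_⟩
        rw [hk, Int.mul_ediv_cancel_left _ (by omega), mul_comm]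
      · rcases ffsUpd_cases hb1 with ⟨h2, h3, rfl⟩ | hb2
        · exact ⟨h2, h3, hidvd⟩
        · exact hinv b hb2
    · exact hinv b hb
  | case2 i best hle =>
    intro _ hinv d hd
    exact hinv d hd

-- outer 'while n > 1' loop of B
def ffsLoopB (mf : Int) (n : Int) (factors : List Int) : Option (List Int) :=
  if hn : 1 < n then
    match h : ffsLargestB n mf with
    | none => none
    | some d => ffsLoopB mf (PySem.Int.floordiv n d) (factors ++ [d])
  else some (PySem.List.sorted factors (fun x => x) true)
termination_by n.toNat
decreasing_by
  exact ffs_loop_dec hn (by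
    have hd := ffsScanB_sound n mf 1 none (by omega) (by intro b hb; cases hb) d h
    omega)

def find_factors_for_sum_alt (ratio_sum : Int) (max_factor : Int) : Option (List Int) :=
  if ratio_sum ≤ 1 then some [] else ffsLoopB max_factor ratio_sum []

-- ===== PRECONDITION & SPEC =====
def Spec_find_factors_for_sum (ratio_sum : Int) (max_factor : Int) (out : Option (List Int)) : Prop := out = find_factors_for_sum_alt ratio_sum max_factor
instance (ratio_sum : Int) (max_factor : Int) (out : Option (List Int)) : Decidable (Spec_find_factors_for_sum ratio_sum max_factor out) := by unfold Spec_find_factors_for_sum; infer_instance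

-- ===== CLAIM (what is proved, stated in full; the proofs are below) =====
def Claim_equal_find_factors_for_sum : Prop := ∀ (ratio_sum : Int) (max_factor : Int), Dom_find_factors_for_sum ratio_sum max_factor → Spec_find_factors_for_sum ratio_sum max_factor (find_factors_for_sum ratio_sum max_factor)

-- ===== LEMMAS AND PROOFS =====

lemma ffs_one_le_ediv {n e : Int} (he : 0 < e) (hle : e ≤ n) : 1 ≤ n / e := by
  rw [Int.le_ediv_iff_mul_le he]; omega

-- A's inner scan, as a plain downward recursion (proof vehicle only)
def scanA (n m : Int) : Option Int :=
  if 1 < m then (if PySem.Int.mod n m = 0 then some m else scanA n (m - 1)) else none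
termination_by m.toNat

lemma ffsFindA_eq_scanA (n : Int) : ∀ m, ffsFindA n m = scanA n m := by
  intro m
  fun_induction scanA n m with
  | case1 m hm hmod =>
    unfold ffsFindA
    rw [PySem.List.pyRange_neg_one_cons hm]
    exact List.find?_cons_of_pos (by simpa using hmod)
  | case2 m hm hmod ih =>
    unfold ffsFindA
    rw [PySem.List.pyRange_neg_one_cons hm,
        List.find?_cons_of_neg (by simpa using hmod)]
    exact ih
  | case3 m hm =>
    unfold ffsFindA
    rw [PySem.List.pyRange_neg_one_eq_nil (by omega)]
    rfl

-- scanA finds exactly the greatest divisor of n in [2, m]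
lemma scanA_spec (n : Int) : ∀ m,
    (∀ d, scanA n m = some d → 1 < d ∧ d ≤ m ∧ d ∣ n ∧ ∀ e, d < e → e ≤ m → ¬ e ∣ n)
    ∧ (scanA n m = none → ∀ e, 1 < e → e ≤ m → ¬ e ∣ n) := by
  intro m
  fun_induction scanA n m with
  | case1 m hm hmod =>
    constructor
    · intro d hd
      have hmd : m = d := by simpa using hd
      subst hmd
      exact ⟨hm, le_refl _, (PySem.Int.mod_eq_zero_iff_dvd n m).mp hmod,
        fun e he1 he2 _ => absurd he1 (by omega)⟩
    · intro hd; cases hd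
  | case2 m hm hmod ih =>
    have hmnd : ¬ m ∣ n := fun hdvd => hmod ((PySem.Int.mod_eq_zero_iff_dvd n m).mpr hdvd)
    constructor
    · intro d hd
      obtain ⟨h1, h2, h3, h4⟩ := ih.1 d hd
      refine ⟨h1, by omega, h3, fun e he1 he2 hedvd => ?_⟩
      rcases lt_or_eq_of_le he2 with hlt | rfl
      · exact h4 e he1 (by omega) hedvd
      · exact hmnd hedvd
    · intro hd e he1 he2 hedvd
      rcases lt_or_eq_of_le he2 with hlt | rfl
      · exact ih.2 hd e he1 (by omega) hedvd
      · exact hmnd hedvd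
  | case3 m hm =>
    constructor
    · intro d hd; cases hd
    · intro _ e he1 he2 _; omega

-- every surviving `best` only grows
lemma ffsUpd_mono {mf b : Int} {best : Option Int} (hb : best = some b) (c : Int) :
    ∃ b', ffsUpd mf best c = some b' ∧ b ≤ b' := by
  subst hb
  unfold ffsUpd
  split_ifs with hg
  · simp only
    split_ifs with hlt
    · exact ⟨c, rfl, by omega⟩
    · exact ⟨b, rfl, le_refl _⟩
  · exact ⟨b, rfl, le_refl _⟩

-- a candidate in range is installed (or something at least as big already is)
lemma ffsUpd_install (mf c : Int) (best : Option Int) (h2 : 2 ≤ c) (h3 : c ≤ mf) :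
    ∃ b', ffsUpd mf best c = some b' ∧ c ≤ b' := by
  unfold ffsUpd
  rw [if_pos ⟨h2, h3⟩]
  cases best with
  | none => exact ⟨c, rfl, le_refl _⟩
  | some b =>
    simp only
    split_ifs with hlt
    · exact ⟨c, rfl, le_refl _⟩
    · exact ⟨b, rfl, by omega⟩

-- completeness of B's scan: at the end, best dominates every divisor of n in [2, mf]
lemma ffsScanB_complete (n mf : Int) (hn : 0 < n) :
    ∀ i best, 1 ≤ i →
      (∀ e, 2 ≤ e → e ≤ mf → e ∣ n → (e < i ∨ PySem.Int.floordiv n e < i) →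
        ∃ b, best = some b ∧ e ≤ b) →
      ∀ e, 2 ≤ e → e ≤ mf → e ∣ n → ∃ b, ffsScanB n mf i best = some b ∧ e ≤ b := by
  intro i best
  fun_induction ffsScanB n mf i best with
  | case1 i best hle ih =>
    intro hi hinv e he1 he2 he3
    refine ih (by omega) ?_ e he1 he2 he3
    -- re-establish the invariant at i + 1
    intro e he1 he2 he3 hwit
    have hq : PySem.Int.floordiv n e = n / e := PySem.Int.floordiv_eq_ediv_of_pos (by omega)
    have hen : e * (n / e) = n := Int.mul_ediv_cancel' he3
    have hq1 : 1 ≤ n / e := ffs_one_le_ediv (by omega) (Int.le_of_dvd hn he3)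
    by_cases hold : e < i ∨ n / e < i
    · obtain ⟨b, hb, hmax⟩ := hinv e he1 he2 he3 (by rw [hq]; exact hold)
      split_ifs with hmod
      · obtain ⟨b1, hb1, hle1⟩ := ffsUpd_mono hb i
        obtain ⟨b2, hb2, hle2⟩ := ffsUpd_mono hb1 (PySem.Int.floordiv n i)
        exact ⟨b2, hb2, by omega⟩
      · exact ⟨b, hb, hmax⟩
    · -- the witness iteration is i itself: e = i or n / e = i
      rw [hq] at hwit
      rcases hwit with hei | hqi
      · have hei' : e = i := by omega
        subst hei'
        have hmod : PySem.Int.mod n e = 0 := (PySem.Int.mod_eq_zero_iff_dvd n e).mpr he3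
        rw [dif_pos hmod]
        obtain ⟨b1, hb1, hle1⟩ := ffsUpd_install mf e best he1 he2
        obtain ⟨b2, hb2, hle2⟩ := ffsUpd_mono hb1 (PySem.Int.floordiv n e)
        exact ⟨b2, hb2, by omega⟩
      · have hqi' : n / e = i := by omega
        have hen' : (n / e) * e = n := by rw [mul_comm]; exact hen
        have hidvd : i ∣ n := ⟨e, by rw [← hqi']; exact hen'.symm⟩
        have hmod : PySem.Int.mod n i = 0 := (PySem.Int.mod_eq_zero_iff_dvd n i).mpr hidvd
        rw [dif_pos hmod]
        have hie : i * e = n := by rw [← hqi']; exact hen'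
        have hni : PySem.Int.floordiv n i = e := by
          rw [PySem.Int.floordiv_eq_ediv_of_pos (by omega), ← hie,
            Int.mul_ediv_cancel_left _ (by omega)]
        rw [hni]
        obtain ⟨b2, hb2, hle2⟩ := ffsUpd_install mf e (ffsUpd mf best i) he1 he2
        exact ⟨b2, hb2, hle2⟩
  | case2 i best hle =>
    intro hi hinv e he1 he2 he3
    -- loop over: i * i > n, so min(e, n/e) < i and the invariant covers e
    have hq : PySem.Int.floordiv n e = n / e := PySem.Int.floordiv_eq_ediv_of_pos (by omega)
    have hen : e * (n / e) = n := Int.mul_ediv_cancel' he3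
    have hq1 : 1 ≤ n / e := ffs_one_le_ediv (by omega) (Int.le_of_dvd hn he3)
    refine hinv e he1 he2 he3 ?_
    rw [hq]
    by_cases hcmp : e ≤ n / e
    · left
      nlinarith
    · right
      nlinarith

-- the two inner finders agree on every n > 1
lemma finders_eq (n mf : Int) (hn : 1 < n) : ffsFindA n mf = ffsLargestB n mf := by
  rw [ffsFindA_eq_scanA]
  have hA := scanA_spec n mf
  have hBnone : ∀ e, 2 ≤ e → e ≤ mf → e ∣ n → ∃ b, ffsLargestB n mf = some b ∧ e ≤ b := by
    intro e he1 he2 he3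
    refine ffsScanB_complete n mf (by omega) 1 none (le_refl _) ?_ e he1 he2 he3
    intro e he1 _ he3 hwit
    exfalso
    have hq : PySem.Int.floordiv n e = n / e := PySem.Int.floordiv_eq_ediv_of_pos (by omega)
    have := ffs_one_le_ediv (n := n) (e := e) (by omega) (Int.le_of_dvd (by omega) he3)
    omega
  cases hsa : scanA n mf with
  | none =>
    cases hsb : ffsLargestB n mf with
    | none => rfl
    | some b =>
      have hb := ffsScanB_sound n mf 1 none (le_refl _) (by intro b hb; cases hb) b hsb
      exact absurd hb.2.2 (hA.2 hsa b (by omega) hb.2.1)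
  | some d =>
    obtain ⟨hd1, hd2, hd3, hd4⟩ := hA.1 d hsa
    obtain ⟨b, hb, hdb⟩ := hBnone d (by omega) hd2 hd3
    have hbp := ffsScanB_sound n mf 1 none (le_refl _) (by intro b hb; cases hb) b hb
    have : b ≤ d := by
      by_contra hcon
      exact hd4 b (by omega) hbp.2.1 hbp.2.2
    rw [hb]
    congr 1
    omega

-- the two outer loops agree
lemma loops_eq (mf : Int) : ∀ (k : Nat) (n : Int) (factors : List Int), n.toNat ≤ k →
    ffsLoopA mf n factors = ffsLoopB mf n factors := by
  intro k
  induction k with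
  | zero =>
    intro n factors hk
    rw [ffsLoopA, ffsLoopB]
    have : ¬ 1 < n := by omega
    rw [dif_neg this, dif_neg this]
  | succ k ih =>
    intro n factors hk
    rw [ffsLoopA, ffsLoopB]
    by_cases hn : 1 < n
    · rw [dif_pos hn, dif_pos hn]
      have heq := finders_eq n mf hn
      cases hfa : ffsFindA n mf with
      | none => rw [← heq, hfa]
      | some d =>
        rw [← heq, hfa]
        simp only
        have hd := ffsFindA_pos hfa
        have hfd : PySem.Int.floordiv n d = n / d := PySem.Int.floordiv_eq_ediv_of_pos (by omega)
        have h1 : n / d < n := ffs_ediv_lt hn hd.1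
        have h2 : 0 ≤ n / d := Int.ediv_nonneg (by omega) (by omega)
        rw [hfd]
        exact ih (n / d) (factors ++ [d]) (by omega)
    · rw [dif_neg hn, dif_neg hn]

-- ===== VERDICT (by name: the statement is the Claim_ definition above) =====
theorem find_factors_for_sum_spec : Claim_equal_find_factors_for_sum := by
  intro ratio_sum max_factor _
  unfold Spec_find_factors_for_sum find_factors_for_sum find_factors_for_sum_alt
  by_cases h : ratio_sum ≤ 1
  · rw [if_pos h, if_pos h]
  · rw [if_neg h, if_neg h]
    exact loops_eq max_factor ratio_sum.toNat ratio_sum [] (le_refl _)
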